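-- pv_equiv track=rewrite | github.com/bryan-ojay/csca08 | Assignments/a1/a1.py | zip_length
-- ===== SOURCE A (Python) =====
-- NUCLEOS = ['A', 'T', 'C', 'G']
--
-- def gene_swap(gene):
--     '''(str or list) -> str or list
--     Helper function used for pair_genes, zip_length and match_mask functions:
--     Takes in a gene, returns a gene containing the nucleotides that pair
--     with each corresponding nucleotide in the given gene.
--     REQ: all elements of gene are in NUCLEOS, NUM_LIST or in ['[', ']', '*'}
--     >>> gene_swap("TCAG")
--     'AGTC'
--     >>> gene_swap("ACTGGATG")
--     'TGACCTAC'
--     >>> gene_swap("CAATGGATG")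
--     'GTTACCTAC'
--     '''
--     # create empty string for new gene
--     new_gene = ""
--
--     # run through all the elements in the inputted gene
--     for nucleotide in gene:
--
--         # check if the element is a valid nucleotide
--         if nucleotide in NUCLEOS:
--             nucleo_index = NUCLEOS.index(nucleotide)
--
--             # pairs for even-indexed nucleotides will pair to the next index
--             if nucleo_index % 2 == 0:
--                 new_gene += NUCLEOS[nucleo_index + 1]
--
--             # pairs for odd-indexed nucleotides will pair to the previous index
--             elif nucleo_index % 2 == 1:
--                     new_gene += NUCLEOS[nucleo_index - 1]
--
--         # if the element is not a valid nucleotide, add to the new gene as is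
--         else:
--             new_gene += nucleotide
--
--     return new_gene
--
-- def zip_length(gene):
--     '''(str) -> int
--     Takes in a string representing a gene, and returns the maximum number of
--     nucleotide pairs that this gene can zip.
--     REQ: all elements of gene are in NUCLEOS
--     >>> zip_length("AGTCTCGCT")
--     2
--     >>> zip_length("AGTCGACT")
--     4
--     >>> zip_length("AGTCTCGCC")
--     0
--     '''
--     # create variable for number of pairs within the gene
--     pairs = 0
--
--     # create a gene string containing the pairs of the gene's nucleotides
--     pair_gene = gene_swap(gene)
--
--     # create variable for the last character in the gene
--     gene_end = len(gene) - 1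
--
--     # scan the gene up until the middle of the gene
--     index = 0
--     gene_scan_limit = (len(gene)//2)
--     while index < gene_scan_limit:
--
--         # check if the nucleotides in the start of the given gene
--         # match the nucleotides at the end of compare_gene
--         equal_check = gene[index] == pair_gene[gene_end - index]
--
--         # if one of these requirements are met, this counts as another pair
--         if equal_check:
--             pairs += 1
--
--         # if not, the gene cannot be zipped anymore
--         else:
--             # scan limit is set to index so the while loop can be stopped
--             gene_scan_limit = index
--
--         index += 1
--
--     return pairs
-- ===== SOURCE B (Python) =====
-- COMP = {'A': 'T', 'T': 'A', 'C': 'G', 'G': 'C'}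
--
-- def zip_length(gene):
--     count = 0
--     i, j = 0, len(gene) - 1
--     while i < j and gene[i] == COMP.get(gene[j], gene[j]):
--         count += 1
--         i += 1
--         j -= 1
--     return count
-- ===== Notes on version B (the rewrite author's own statement) =====
-- stated objective: simpler
-- what changed: B drops the gene_swap precompute of a full complement string and the mutable scan-limit while loop, doing a single two-pointer pass from both ends with a complement dict (defaulting to the character itself) that stops at the first mismatch.
import Mathlib
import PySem

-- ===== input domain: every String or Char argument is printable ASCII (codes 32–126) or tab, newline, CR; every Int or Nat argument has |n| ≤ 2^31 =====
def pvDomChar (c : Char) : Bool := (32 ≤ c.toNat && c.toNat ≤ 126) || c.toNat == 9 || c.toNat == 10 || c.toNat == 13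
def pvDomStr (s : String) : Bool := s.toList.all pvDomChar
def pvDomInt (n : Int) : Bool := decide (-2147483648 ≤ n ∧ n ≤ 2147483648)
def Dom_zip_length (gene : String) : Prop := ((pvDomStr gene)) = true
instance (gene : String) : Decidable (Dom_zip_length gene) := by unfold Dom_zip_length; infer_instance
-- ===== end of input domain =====

-- B changes the decomposition: one two-pointer pass with a complement dict instead of
-- A's gene_swap precompute and mutable-scan-limit while loop (objective: simpler).

-- ===== PORT A =====
def NUCLEOS : List Char := ['A', 'T', 'C', 'G']

-- one iteration of gene_swap's for-loop (the per-character body, extracted as a helper)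
def gene_swap_step (acc : List Char) (nucleotide : Char) : List Char :=
  if nucleotide ∈ NUCLEOS then
    match PySem.List.index? NUCLEOS nucleotide with
    | some i =>
      if (i : Int) % 2 == 0 then
        -- NUCLEOS[i+1]: i ∈ {0,2} here, so the index is always in range (none = IndexError, unreachable)
        acc ++ (PySem.List.pyGet? NUCLEOS ((i : Int) + 1)).toList
      else
        -- NUCLEOS[i-1]: i ∈ {1,3} here, always in range
        acc ++ (PySem.List.pyGet? NUCLEOS ((i : Int) - 1)).toList
    | none => acc   -- unreachable: membership was just checked
  else
    acc ++ [nucleotide]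

def gene_swap (gene : String) : String :=
  String.ofList (gene.toList.foldl gene_swap_step [])

-- the while loop of zip_length; gene_scan_limit is mutable in Python, so it is loop state
def zip_length_loop (gene pair_gene : List Char) (gene_end : Int)
    (pairs index gene_scan_limit : Int) : Int :=
  if index < gene_scan_limit then
    -- gene[index] == pair_gene[gene_end - index]; both indices are in range whenever the
    -- loop is reached from zip_length (none = IndexError, unreachable there)
    let equal_check := PySem.List.pyGet? gene index == PySem.List.pyGet? pair_gene (gene_end - index)
    if equal_check then
      zip_length_loop gene pair_gene gene_end (pairs + 1) (index + 1) gene_scan_limit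
    else
      zip_length_loop gene pair_gene gene_end pairs (index + 1) index
  else
    pairs
termination_by (gene_scan_limit - index).toNat
decreasing_by all_goals (simp_wf; omega)

def zip_length (gene : String) : Int :=
  let pair_gene := (gene_swap gene).toList
  let g := gene.toList
  let gene_end : Int := (g.length : Int) - 1
  zip_length_loop g pair_gene gene_end 0 0 (PySem.Int.floordiv (g.length : Int) 2)

-- ===== PORT B =====
def COMP : PySem.Dict Char Char :=
  (((PySem.Dict.empty.insert 'A' 'T').insert 'T' 'A').insert 'C' 'G').insert 'G' 'C'

def zip_length_alt_loop (g : List Char) (count i j : Int) : Int :=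
  if i < j then
    match PySem.List.pyGet? g i, PySem.List.pyGet? g j with
    | some a, some b =>
      if a = COMP.getD b b then
        zip_length_alt_loop g (count + 1) (i + 1) (j - 1)
      else
        count
    | _, _ => count   -- unreachable from zip_length_alt: i, j always in range
  else
    count
termination_by (j - i).toNat
decreasing_by simp_wf; omega

def zip_length_alt (gene : String) : Int :=
  zip_length_alt_loop gene.toList 0 0 ((gene.toList.length : Int) - 1)

-- ===== PRECONDITION & SPEC =====
def Spec_zip_length (gene : String) (out : Int) : Prop := out = zip_length_alt gene
instance (gene : String) (out : Int) : Decidable (Spec_zip_length gene out) := by unfold Spec_zip_length; infer_instance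

-- ===== CLAIM (what is proved, stated in full; the proofs are below) =====
def Claim_equal_zip_length : Prop := ∀ (gene : String), Dom_zip_length gene → Spec_zip_length gene (zip_length gene)

-- ===== LEMMAS AND PROOFS =====

-- the per-character complement both programs use, as a plain function
def swapc (c : Char) : Char := COMP.getD c c

lemma gene_swap_step_eq (acc : List Char) (c : Char) :
    gene_swap_step acc c = acc ++ [swapc c] := by
  by_cases hA : c = 'A'
  · subst hA
    rfl
  by_cases hT : c = 'T'
  · subst hT
    rfl
  by_cases hC : c = 'C'
  · subst hC
    rfl
  by_cases hG : c = 'G'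
  · subst hG
    rfl
  · have hmem : c ∉ NUCLEOS := by
      simp [NUCLEOS]
      exact ⟨hA, hT, hC, hG⟩
    have hcomp : swapc c = c := by
      simp [swapc, COMP, PySem.Dict.getD_insert, PySem.Dict.getD_empty, hA, hT, hC, hG]
    simp [gene_swap_step, hmem, hcomp]

lemma foldl_gene_swap_step (g acc : List Char) :
    g.foldl gene_swap_step acc = acc ++ g.map swapc := by
  induction g generalizing acc with
  | nil => simp
  | cons c rest ih => simp [List.foldl, gene_swap_step_eq, ih]

lemma gene_swap_toList (s : String) :
    (gene_swap s).toList = s.toList.map swapc := by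
  simp [gene_swap, foldl_gene_swap_step]

lemma loop_eq (g : List Char) (k : Nat) (i pairs : Int) (hi : 0 ≤ i)
    (hk : (PySem.Int.floordiv (g.length : Int) 2 - i).toNat = k) :
    zip_length_loop g (g.map swapc) ((g.length : Int) - 1) pairs i
        (PySem.Int.floordiv (g.length : Int) 2)
      = zip_length_alt_loop g pairs i ((g.length : Int) - 1 - i) := by
  have hF : PySem.Int.floordiv (g.length : Int) 2 = ((g.length / 2 : Nat) : Int) :=
    PySem.Int.floordiv_natCast g.length 2
  induction k generalizing i pairs with
  | zero =>
    have hnot : ¬ i < PySem.Int.floordiv (g.length : Int) 2 := by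
      rw [hF] at hk ⊢; omega
    have hnot' : ¬ i < (g.length : Int) - 1 - i := by
      rw [hF] at hnot; omega
    rw [zip_length_loop, zip_length_alt_loop, if_neg hnot, if_neg hnot']
  | succ k ih =>
    have hlt : i < PySem.Int.floordiv (g.length : Int) 2 := by
      rw [hF] at hk ⊢; omega
    have hlt' : i < (g.length : Int) - 1 - i := by
      rw [hF] at hlt; omega
    have hir : i.toNat < g.length := by rw [hF] at hlt; omega
    have hj0 : 0 ≤ (g.length : Int) - 1 - i := by omega
    have hjr : ((g.length : Int) - 1 - i).toNat < g.length := by omega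
    rw [zip_length_loop, zip_length_alt_loop, if_pos hlt, if_pos hlt']
    simp only [PySem.List.pyGet?_of_nonneg g hi, PySem.List.pyGet?_of_nonneg (g.map swapc) hj0,
      PySem.List.pyGet?_of_nonneg g hj0, List.getElem?_map,
      List.getElem?_eq_getElem hir, List.getElem?_eq_getElem hjr, Option.map_some,
      show ∀ c : Char, COMP.getD c c = swapc c from fun _ => rfl]
    by_cases heq : g[i.toNat] = swapc g[((g.length : Int) - 1 - i).toNat]
    · have hbeq : (some g[i.toNat] == some (swapc g[((g.length : Int) - 1 - i).toNat])) = true := by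
        simp [heq]
      rw [hbeq, if_pos rfl, if_pos heq,
        show (g.length : Int) - 1 - i - 1 = (g.length : Int) - 1 - (i + 1) from by ring]
      exact ih (i + 1) (pairs + 1) (by omega) (by rw [hF] at hk ⊢; omega)
    · have hbeq : (some g[i.toNat] == some (swapc g[((g.length : Int) - 1 - i).toNat])) = false := by
        simp [heq]
      rw [hbeq, if_neg (by simp), if_neg heq]
      rw [zip_length_loop, if_neg (by omega)]

theorem zip_length_eq_alt (gene : String) : zip_length gene = zip_length_alt gene := by
  simp only [zip_length, zip_length_alt, gene_swap_toList]
  have := loop_eq gene.toList (PySem.Int.floordiv (gene.toList.length : Int) 2 - 0).toNat 0 0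
    le_rfl rfl
  simpa using this

-- ===== VERDICT (by name: the statement is the Claim_ definition above) =====
theorem zip_length_spec : Claim_equal_zip_length := by
  intro gene _
  unfold Spec_zip_length
  exact zip_length_eq_alt gene
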